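-- pv_equiv track=rewrite | github.com/asmeyatsky/hanaforge | infrastructure/adapters/data_profiling_adapter.py | _detect_duplicate_keys
-- ===== SOURCE A (Python) =====
-- def _detect_duplicate_keys(rows: list[dict], fields: list[str]) -> int:
--     """Detect duplicate records based on the first field (assumed primary key)."""
--     if not fields or not rows:
--         return 0
--
--     key_field = fields[0]
--     seen: dict[str, int] = {}
--     duplicates = 0
--
--     for row in rows:
--         key_val = str(row.get(key_field, ""))
--         if key_val in seen:
--             if seen[key_val] == 1:
--                 duplicates += 1  # first duplicate pair
--             duplicates += 0 if seen[key_val] > 1 else 0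
--             seen[key_val] += 1
--         else:
--             seen[key_val] = 1
--
--     # Count total records that are part of any duplicate group
--     return sum(count - 1 for count in seen.values() if count > 1)
-- ===== SOURCE B (Python) =====
-- def _detect_duplicate_keys(rows: list[dict], fields: list[str]) -> int:
--     """Detect duplicate records based on the first field (assumed primary key)."""
--     if not fields or not rows:
--         return 0
--     keys = sorted(str(row.get(fields[0], "")) for row in rows)
--     # in sorted order equal keys are adjacent: each adjacent equal pair is one surplus record
--     return sum(1 for a, b in zip(keys, keys[1:]) if a == b)
-- ===== Notes on version B (the rewrite author's own statement) =====
-- stated objective: alternative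
-- what changed: Replaces A's frequency dict with dead duplicates counter and a final filter-and-sum pass over the counts by sort-then-scan: sort the coerced keys and count adjacent equal pairs, which equals the surplus records in duplicate groups.
import Mathlib
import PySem

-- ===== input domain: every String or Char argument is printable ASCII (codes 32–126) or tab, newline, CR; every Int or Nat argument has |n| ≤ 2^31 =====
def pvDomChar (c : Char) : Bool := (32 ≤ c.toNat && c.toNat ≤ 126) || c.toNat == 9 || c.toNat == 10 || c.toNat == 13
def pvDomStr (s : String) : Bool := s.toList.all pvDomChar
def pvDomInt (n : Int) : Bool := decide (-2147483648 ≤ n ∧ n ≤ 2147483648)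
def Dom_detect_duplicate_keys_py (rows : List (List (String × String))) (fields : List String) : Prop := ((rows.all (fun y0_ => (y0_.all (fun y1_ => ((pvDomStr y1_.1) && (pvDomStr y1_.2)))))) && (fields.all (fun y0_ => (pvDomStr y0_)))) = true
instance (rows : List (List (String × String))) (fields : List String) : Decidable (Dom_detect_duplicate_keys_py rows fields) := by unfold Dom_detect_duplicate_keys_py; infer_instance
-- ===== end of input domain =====

-- B replaces A's frequency dict (with its dead duplicates counter) and final
-- filter-and-sum pass by sort-then-scan: sort the keys, count adjacent equal pairs
-- (objective: alternative algorithm).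

-- ===== PORT A =====
-- one loop step of A: updates (seen, duplicates); the `duplicates` counter is dead code in A but ported faithfully
def detectDupStepA (key_field : String) (st : PySem.Dict String Int × Int) (row : List (String × String)) :
    PySem.Dict String Int × Int :=
  let key_val := (PySem.Dict.mk row).getD key_field ""
  if st.1.contains key_val then
    let dup1 := if st.1.getD key_val 0 = 1 then st.2 + 1 else st.2
    let dup2 := dup1 + (if st.1.getD key_val 0 > 1 then 0 else 0)
    (st.1.insert key_val (st.1.getD key_val 0 + 1), dup2)
  else
    (st.1.insert key_val 1, st.2)

def detect_duplicate_keys_py (rows : List (List (String × String))) (fields : List String) : Int :=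
  if fields = [] ∨ rows = [] then 0
  else
    let key_field := fields.headD ""
    let st := rows.foldl (detectDupStepA key_field) (PySem.Dict.empty, 0)
    (((st.1.values).filter (fun c => 1 < c)).map (fun c => c - 1)).sum

-- ===== PORT B =====
def detect_duplicate_keys_py_alt (rows : List (List (String × String))) (fields : List String) : Int :=
  if fields = [] ∨ rows = [] then 0
  else
    let keys := PySem.List.sorted (rows.map (fun row => (PySem.Dict.mk row).getD (fields.headD "") "")) (fun x => x) false
    -- zip(keys, keys[1:]) and sum 1 over the equal pairs
    (((keys.zip (keys.drop 1)).filter (fun p => p.1 == p.2)).length : Int)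

-- ===== PRECONDITION & SPEC =====
def Spec_detect_duplicate_keys_py (rows : List (List (String × String))) (fields : List String) (out : Int) : Prop := out = detect_duplicate_keys_py_alt rows fields
instance (rows : List (List (String × String))) (fields : List String) (out : Int) : Decidable (Spec_detect_duplicate_keys_py rows fields out) := by unfold Spec_detect_duplicate_keys_py; infer_instance

-- ===== CLAIM (what is proved, stated in full; the proofs are below) =====
def Claim_equal_detect_duplicate_keys_py : Prop := ∀ (rows : List (List (String × String))) (fields : List String), Dom_detect_duplicate_keys_py rows fields → Spec_detect_duplicate_keys_py rows fields (detect_duplicate_keys_py rows fields)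

-- ===== LEMMAS AND PROOFS =====

-- A's seen-dict equals the unconditional counting fold over the key list
theorem seen_eq_counter_fold (kf : String) (rows : List (List (String × String)))
    (d : PySem.Dict String Int) (du : Int) :
    (rows.foldl (detectDupStepA kf) (d, du)).1 =
      (rows.map (fun row => (PySem.Dict.mk row).getD kf "")).foldl
        (fun d x => d.insert x (d.getD x 0 + 1)) d := by
  induction rows generalizing d du with
  | nil => rfl
  | cons r t ih =>
    simp only [List.foldl_cons, List.map_cons, detectDupStepA]
    by_cases h : d.contains ((PySem.Dict.mk r).getD kf "")
    · simp only [h, if_true]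
      exact ih _ _
    · simp only [h, if_false, Bool.false_eq_true]
      have h0 : d.getD ((PySem.Dict.mk r).getD kf "") 0 = 0 := by
        apply PySem.Dict.getD_of_not_contains
        simpa using h
      rw [h0, show (0 : Int) + 1 = 1 from rfl]
      exact ih _ _

theorem filter_sum_of_ge_one (vs : List Int) (h : ∀ c ∈ vs, 1 ≤ c) :
    (((vs.filter (fun c => 1 < c)).map (fun c => c - 1)).sum) = vs.sum - vs.length := by
  induction vs with
  | nil => simp
  | cons c t ih =>
    have hc : 1 ≤ c := h c (by simp)
    have ht := ih (fun x hx => h x (by simp [hx]))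
    by_cases h1 : 1 < c
    · rw [List.filter_cons_of_pos (by simpa using h1), List.map_cons]
      simp only [List.sum_cons, List.length_cons, ht]
      push_cast; ring
    · have hc1 : c = 1 := by omega
      rw [List.filter_cons_of_neg (by simpa using h1), ht]
      simp only [List.sum_cons, List.length_cons, hc1]
      push_cast; ring

theorem ofList_perm_dedup {α : Type} [DecidableEq α] (xs : List α) :
    (PySem.Set.ofList xs).Perm xs.dedup := by
  apply List.Perm.symm
  apply (List.perm_ext_iff_of_nodup (List.nodup_dedup xs) (PySem.Set.nodup_ofList (xs := xs))).2
  intro a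
  simp [List.mem_dedup, PySem.Set.mem_ofList]

theorem sum_counts_ofList (xs : List String) :
    ((PySem.Set.ofList xs).map (fun k => (xs.count k : Int))).sum = xs.length := by
  have hp := (ofList_perm_dedup xs).map (fun k => (xs.count k : Int))
  rw [hp.sum_eq,
    show (List.map (fun k => ((xs.count k : Nat) : Int)) xs.dedup)
        = (List.map (fun k => xs.count k) xs.dedup).map Nat.cast by simp,
    ← Nat.cast_list_sum, List.sum_map_count_dedup_eq_length]

-- in a ≤-sorted list, (# adjacent equal pairs) + (# distinct values) = length
theorem adj_add_dedup_of_pairwise {α : Type} [LinearOrder α] [DecidableEq α] :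
    ∀ (l : List α), l.Pairwise (· ≤ ·) →
    ((l.zip (l.drop 1)).filter (fun p => p.1 = p.2)).length + l.dedup.length = l.length
  | [], _ => by simp
  | [a], _ => by simp
  | a :: b :: t, hp => by
    have hab : a ≤ b := (List.pairwise_cons.1 hp).1 b (by simp)
    have htp : (b :: t).Pairwise (· ≤ ·) := (List.pairwise_cons.1 hp).2
    have ih := adj_add_dedup_of_pairwise (b :: t) htp
    simp only [List.drop_succ_cons, List.drop_zero, List.zip_cons_cons]
    by_cases hab' : a = b
    · have hmem : a ∈ b :: t := by simp [hab']
      rw [List.filter_cons_of_pos (by simpa using hab'), List.dedup_cons_of_mem hmem]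
      simp only [List.drop_succ_cons, List.drop_zero] at ih
      simp only [List.length_cons] at ih ⊢
      omega
    · have hnot : a ∉ b :: t := by
        intro hm
        rcases List.mem_cons.1 hm with h | h
        · exact hab' h
        · have hbc : b ≤ a := by
            have := (List.pairwise_cons.1 htp).1 a h
            exact this
          exact hab' (le_antisymm hab hbc)
      rw [List.filter_cons_of_neg (by simpa using hab'), List.dedup_cons_of_notMem hnot]
      simp only [List.drop_succ_cons, List.drop_zero] at ih
      simp only [List.length_cons] at ih ⊢
      omega

-- ===== VERDICT (by name: the statement is the Claim_ definition above) =====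
theorem detect_duplicate_keys_py_spec : Claim_equal_detect_duplicate_keys_py := by
  intro rows fields _
  unfold Spec_detect_duplicate_keys_py detect_duplicate_keys_py detect_duplicate_keys_py_alt
  by_cases hg : fields = [] ∨ rows = []
  · simp [hg]
  · simp only [hg, if_false]
    set kf := fields.headD "" with hkf
    set ks := rows.map (fun row => (PySem.Dict.mk row).getD kf "") with hks
    -- A's side: length ks - number of distinct keys
    rw [seen_eq_counter_fold kf rows PySem.Dict.empty 0]
    rw [PySem.Dict.foldl_insert_getD_add_one_eq_counter]
    have hvals : (PySem.Dict.counter ks).values =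
        (PySem.Set.ofList ks).map (fun k => (ks.count k : Int)) := by
      simp [PySem.Dict.values, PySem.Dict.items_counter, List.map_map, Function.comp_def]
    rw [hvals]
    have hge : ∀ c ∈ (PySem.Set.ofList ks).map (fun k => (ks.count k : Int)), 1 ≤ c := by
      intro c hc
      obtain ⟨k, hk, rfl⟩ := List.mem_map.1 hc
      have : k ∈ ks := (PySem.Set.mem_ofList _ _).1 hk
      have := List.count_pos_iff.2 this
      omega
    rw [filter_sum_of_ge_one _ hge, sum_counts_ofList]
    -- B's side: sorted keys, adjacent equal pairs
    set s := PySem.List.sorted ks (fun x => x) false with hsdef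
    have hperm : s.Perm ks := PySem.List.sorted_perm (xs := ks) (key := fun x => x) (rev := false)
    have hpw : s.Pairwise (· ≤ ·) := by
      have := PySem.List.sorted_pairwise (xs := ks) (key := fun x => x)
      simpa using this
    have hadj := adj_add_dedup_of_pairwise s hpw
    have hlen1 : s.length = ks.length := hperm.length_eq
    have hlen2 : s.dedup.length = ks.dedup.length := hperm.dedup.length_eq
    have hset : (PySem.Set.ofList ks).length = ks.dedup.length := (ofList_perm_dedup ks).length_eq
    have hfun : (fun p : String × String => p.1 == p.2) = (fun p => decide (p.1 = p.2)) := by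
      funext p; by_cases h : p.1 = p.2 <;> simp [h]
    simp only [List.length_map] at *
    rw [hfun]
    omega
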